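-- pv_equiv track=rewrite | github.com/pypi-data/pypi-mirror-384 | packages/dakora/dakora-1.0.3-py3-none-any.whl/dakora/registry/serialization.py | _needs_quote
-- ===== SOURCE A (Python) =====
-- def _needs_quote(s: str) -> bool:
--     return (
--         s != s.strip()
--         or any(ch in s for ch in [":", "#"])
--         or s.startswith(
--             ("-", "?", "{", "}", "[", "]", "!", "*", "&", ">", "|", "@", "`")
--         )
--         or "\n" in s
--     )
-- ===== SOURCE B (Python) =====
-- def _needs_quote(s: str) -> bool:
--     for i, ch in enumerate(s):
--         if i == 0 and ch in "-?{}[]!*&>|@`":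
--             return True
--         if ch in ":#\n":
--             return True
--     return s != s.strip()
-- ===== Notes on version B (the rewrite author's own statement) =====
-- stated objective: alternative
-- what changed: Replaces A's five separate whole-string scans (two substring 'in' checks, a 13-way startswith tuple, a newline scan) by one single pass over enumerate(s) that checks the start-set only at index 0 and the forbidden characters everywhere, falling back to the strip comparison.
import Mathlib
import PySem

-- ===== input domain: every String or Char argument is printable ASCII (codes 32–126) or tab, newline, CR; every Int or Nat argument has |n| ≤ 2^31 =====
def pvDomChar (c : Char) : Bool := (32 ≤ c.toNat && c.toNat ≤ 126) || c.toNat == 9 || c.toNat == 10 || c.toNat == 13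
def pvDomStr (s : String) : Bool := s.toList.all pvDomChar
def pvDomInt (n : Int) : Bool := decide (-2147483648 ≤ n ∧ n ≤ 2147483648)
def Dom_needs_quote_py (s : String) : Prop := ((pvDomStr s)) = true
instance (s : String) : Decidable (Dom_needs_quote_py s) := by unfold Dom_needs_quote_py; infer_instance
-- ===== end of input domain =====

-- B replaces A's several whole-string scans by one single pass over the characters; return value only, no side effects.

-- ===== PORT A =====
-- literal transliteration of A: strip comparison, the two 'in' scans, the startswith tuple, the '\n' scan
def needs_quote_py (s : String) : Bool :=
  (s != PySem.Str.strip s)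
  || ([":", "#"].any (fun ch => PySem.Str.isIn ch s))
  || (["-", "?", "{", "}", "[", "]", "!", "*", "&", ">", "|", "@", "`"].any
        (fun p => PySem.Str.startswith s p))
  || PySem.Str.isIn "\n" s

-- ===== PORT B =====
-- the single loop of Source B, index tracked like enumerate; 'ch in "<lit>"' is char membership
def nqLoop : Nat → List Char → Bool
  | _, [] => false
  | i, ch :: rest =>
    if i == 0 && "-?{}[]!*&>|@`".toList.contains ch then true
    else if ":#\n".toList.contains ch then true
    else nqLoop (i + 1) rest

def needs_quote_py_alt (s : String) : Bool :=
  if nqLoop 0 s.toList then true else (s != PySem.Str.strip s)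

-- ===== PRECONDITION & SPEC =====
def Spec_needs_quote_py (s : String) (out : Bool) : Prop := out = needs_quote_py_alt s
instance (s : String) (out : Bool) : Decidable (Spec_needs_quote_py s out) := by unfold Spec_needs_quote_py; infer_instance

-- ===== CLAIM (what is proved, stated in full; the proofs are below) =====
def Claim_equal_needs_quote_py : Prop := ∀ (s : String), Dom_needs_quote_py s → Spec_needs_quote_py s (needs_quote_py s)

-- ===== LEMMAS AND PROOFS =====

-- after index 0 the loop only scans for ':', '#', '\n'
theorem nqLoop_succ (i : Nat) (cs : List Char) :
    nqLoop (i + 1) cs = cs.any (fun ch => ":#\n".toList.contains ch) := by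
  induction cs generalizing i with
  | nil => rfl
  | cons c t ih =>
    simp only [nqLoop, List.any_cons]
    have h0 : ((i + 1) == 0) = false := by simp
    rw [h0]
    simp [ih]

-- single-character substring containment is character membership
theorem singleton_isIn (c : Char) (cs : List Char) :
    PySem.Chars.isIn [c] cs = cs.contains c := by
  simp only [List.contains_eq_mem]
  by_cases h : c ∈ cs
  · rw [(PySem.Chars.isIn_iff_infix _ _).mpr, decide_eq_true h]
    obtain ⟨l, r, hm⟩ := List.mem_iff_append.mp h
    exact ⟨l, r, by simp [hm]⟩
  · rw [(PySem.Chars.isIn_eq_false_iff _ _).mpr, decide_eq_false h]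
    intro ⟨l, r, hm⟩
    exact h (by rw [← hm]; simp)

-- startswith a single-character prefix looks only at the first character
theorem singleton_startswith (p c : Char) (t : List Char) :
    PySem.Chars.startswith (c :: t) [p] = (c == p) := by
  by_cases h : c = p
  · subst h
    rw [beq_self_eq_true]
    exact (PySem.Chars.startswith_iff _ _).mpr ⟨t, rfl⟩
  · have hnp : ¬ ([p] <+: c :: t) := by
      intro ⟨r, hr⟩; exact h (by injection hr with h1 _; exact h1.symm)
    rw [Bool.eq_false_iff.mpr (fun hc => hnp ((PySem.Chars.startswith_iff _ _).mp hc))]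
    simp [h]

theorem singleton_startswith_nil (p : Char) :
    PySem.Chars.startswith ([] : List Char) [p] = false := by
  rw [Bool.eq_false_iff]
  intro hc
  obtain ⟨r, hr⟩ := (PySem.Chars.startswith_iff _ _).mp hc
  simp at hr

theorem if_eq_or (b x : Bool) : (if b = true then true else x) = (b || x) := by
  cases b <;> simp

theorem beq_comm_char (a b : Char) : (a == b) = (b == a) := by
  by_cases h : a = b
  · simp [h]
  · simp [h, Ne.symm h]

theorem any_mem3 (t : List Char) :
    t.any (fun ch => [':', '#', '\n'].contains ch)
      = (t.contains ':' || (t.contains '#' || t.contains '\n')) := by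
  induction t with
  | nil => rfl
  | cons c t ih =>
    rw [List.any_cons, ih]
    have hbd : ∀ d : Char, (c == d) = decide (c = d) := by
      intro d; by_cases h : c = d <;> simp [h]
    have hm : ([':', '#', '\n'].contains c) = (c == ':' || (c == '#' || c == '\n')) := by
      simp [List.contains_cons, Bool.or_assoc, hbd]
    have r1 : ((c :: t).contains ':') = ((':' == c) || t.contains ':') := rfl
    have r2 : ((c :: t).contains '#') = (('#' == c) || t.contains '#') := rfl
    have r3 : ((c :: t).contains '\n') = (('\n' == c) || t.contains '\n') := rfl
    rw [hm, r1, r2, r3, beq_comm_char ':' c, beq_comm_char '#' c, beq_comm_char '\n' c]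
    cases c == ':' <;> cases c == '#' <;> cases c == '\n' <;>
      simp [Bool.or_assoc, Bool.or_comm, Bool.or_left_comm]

-- ===== VERDICT (by name: the statement is the Claim_ definition above) =====
theorem needs_quote_py_spec : Claim_equal_needs_quote_py := by
  intro s _
  unfold Spec_needs_quote_py needs_quote_py needs_quote_py_alt
  simp only [PySem.Str.isIn_eq, PySem.Str.startswith_eq, List.any_cons, List.any_nil]
  have h1 : (":" : String).toList = [':'] := rfl
  have h2 : ("#" : String).toList = ['#'] := rfl
  have h3 : ("\n" : String).toList = ['\n'] := rfl
  have hset : ("-?{}[]!*&>|@`" : String).toList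
      = ['-', '?', '{', '}', '[', ']', '!', '*', '&', '>', '|', '@', '`'] := rfl
  have h4 : ("-" : String).toList = ['-'] := rfl
  have h5 : ("?" : String).toList = ['?'] := rfl
  have h6 : ("{" : String).toList = ['{'] := rfl
  have h7 : ("}" : String).toList = ['}'] := rfl
  have h8 : ("[" : String).toList = ['['] := rfl
  have h9 : ("]" : String).toList = [']'] := rfl
  have h10 : ("!" : String).toList = ['!'] := rfl
  have h11 : ("*" : String).toList = ['*'] := rfl
  have h12 : ("&" : String).toList = ['&'] := rfl
  have h13 : (">" : String).toList = ['>'] := rfl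
  have h14 : ("|" : String).toList = ['|'] := rfl
  have h15 : ("@" : String).toList = ['@'] := rfl
  have h16 : ("`" : String).toList = ['`'] := rfl
  have hm3 : (":#\n" : String).toList = [':', '#', '\n'] := rfl
  rw [h1, h2, h3, h4, h5, h6, h7, h8, h9, h10, h11, h12, h13, h14, h15, h16]
  cases hs : s.toList with
  | nil =>
    simp [nqLoop, singleton_isIn, singleton_startswith_nil]
  | cons c t =>
    simp only [nqLoop, nqLoop_succ, hset, hm3, singleton_isIn, singleton_startswith]
    rw [if_eq_or, if_eq_or, if_eq_or, any_mem3 t]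
    simp only [List.contains_cons, beq_comm_char, Bool.or_false, Bool.false_or,
      beq_self_eq_true, Bool.true_and]
    ac_rfl
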